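-- pv_equiv track=rewrite | github.com/variability2026-submission/replication-package | fca_core.py | find_pair_implications
-- ===== SOURCE A (Python) =====
-- from typing import Dict, FrozenSet, Set, Tuple
--
-- Context = Dict[str, Set[str]]
--
-- Implication = Tuple[FrozenSet[str], FrozenSet[str]]
--
-- def prime_objects(context: Context, attributes: Set[str]) -> Set[str]:
--     """A' -- objects that have ALL attributes in A."""
--     if not attributes:
--         return set(context.keys())
--     return {obj for obj, attrs in context.items() if attributes <= attrs}
--
-- def prime_attributes(context: Context, objects: Set[str]) -> Set[str]:
--     """B' -- attributes shared by ALL objects in B."""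
--     if not objects:
--         # Convention: empty object set → union of all attributes
--         return set().union(*context.values()) if context else set()
--     result: Set[str] | None = None
--     for obj in objects:
--         if result is None:
--             result = context[obj].copy()
--         else:
--             result &= context[obj]
--     return result if result is not None else set()
--
-- def closure(context: Context, attributes: Set[str]) -> Set[str]:
--     """A'' -- double prime / closure of an attribute set."""
--     return prime_attributes(context, prime_objects(context, attributes))
--
-- def find_pair_implications(context: Context) -> list[Implication]:
--     """Find implications with two-attribute premises (includes impossibilities)."""
--     all_attrs = sorted(set().union(*context.values()))
--     full = frozenset(all_attrs)
--     results: list[Implication] = []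
--
--     for i, a1 in enumerate(all_attrs):
--         for a2 in all_attrs[i + 1:]:
--             pair = {a1, a2}
--             c = frozenset(closure(context, pair))
--             if c - pair:
--                 results.append((frozenset(pair), c))
--     return results
-- ===== SOURCE B (Python) =====
-- def find_pair_implications(context):
--     """Find implications with two-attribute premises (includes impossibilities).
--
--     Precomputes an extent index (attribute -> set of objects having it) so each
--     pair's shared-object set is a set intersection instead of a rescan of every
--     object with a subset test.
--     """
--     extent = {}
--     for obj, attrs in context.items():
--         for a in attrs:
--             extent[a] = extent.get(a, set()) | {obj}
--
--     full = frozenset().union(*context.values())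
--     all_attrs = sorted(full)
--     results = []
--     for i, a1 in enumerate(all_attrs):
--         for a2 in all_attrs[i + 1:]:
--             objs = extent[a1] & extent[a2]
--             if objs:
--                 c = None
--                 for o in objs:
--                     s = context[o]
--                     c = s if c is None else c & s
--                 c = frozenset(c)
--             else:
--                 # empty object set: closure is the full attribute set
--                 c = frozenset(full)
--             pair = {a1, a2}
--             if c - pair:
--                 results.append((frozenset(pair), c))
--     return results
-- ===== Notes on version B (the rewrite author's own statement) =====
-- stated objective: alternative
-- what changed: B precomputes an extent index mapping each attribute to the set of objects that have it, so each pair's shared-object set is one set intersection extent[a1] & extent[a2] and the closure is intersected only over those objects, instead of A's per-pair rescan of every object with a subset test inside prime_objects.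
import Mathlib
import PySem

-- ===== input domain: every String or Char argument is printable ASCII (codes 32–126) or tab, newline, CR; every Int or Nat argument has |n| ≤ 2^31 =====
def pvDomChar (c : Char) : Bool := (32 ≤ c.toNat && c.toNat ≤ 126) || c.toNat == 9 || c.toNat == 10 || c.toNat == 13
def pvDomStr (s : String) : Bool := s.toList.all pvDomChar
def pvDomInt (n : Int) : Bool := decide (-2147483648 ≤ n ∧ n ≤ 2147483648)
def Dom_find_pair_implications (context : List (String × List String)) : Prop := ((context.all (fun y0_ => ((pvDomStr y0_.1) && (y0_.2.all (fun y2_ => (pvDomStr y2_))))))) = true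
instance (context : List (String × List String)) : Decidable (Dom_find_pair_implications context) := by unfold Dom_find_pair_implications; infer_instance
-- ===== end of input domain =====

-- B replaces A's per-pair subset rescan with a precomputed attribute→objects extent index; equal return values proved below.

-- ===== PORT A =====
-- the dict argument: List (String × List String) read as a Python dict of sets (insertion order, last duplicate key wins)
def pvCtx (context : List (String × List String)) : PySem.Dict String (List String) :=
  context.foldl (fun d kv => d.insert kv.1 (PySem.Set.ofList kv.2)) PySem.Dict.empty

-- set().union(*context.values())  (also 'full' in B)
def pvUnionVals (ctx : PySem.Dict String (List String)) : List String :=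
  ctx.values.foldl (fun s v => PySem.Set.union s v) PySem.Set.empty

-- the 'result = None; for obj in objects: …' intersection loop (A's prime_attributes loop; B's inner loop is the same Python code)
def intersectLoop (ctx : PySem.Dict String (List String)) (objects : List String) : Option (List String) :=
  objects.foldl (fun r obj =>
    match r with
    | none => some (ctx.getD obj PySem.Set.empty)          -- context[obj]: obj always a key here (comes from the context itself)
    | some s => some (PySem.Set.inter s (ctx.getD obj PySem.Set.empty))) none

def prime_objects (ctx : PySem.Dict String (List String)) (attributes : List String) : List String :=
  if attributes = [] then PySem.Set.ofList ctx.keys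
  else PySem.Set.ofList ((ctx.items.filter (fun p => PySem.Set.issubset attributes p.2)).map (·.1))

def prime_attributes (ctx : PySem.Dict String (List String)) (objects : List String) : List String :=
  if objects = [] then (if ctx.items = [] then PySem.Set.empty else pvUnionVals ctx)
  else
    match intersectLoop ctx objects with
    | some r => r
    | none => PySem.Set.empty

def fcaClosure (ctx : PySem.Dict String (List String)) (attributes : List String) : List String :=
  prime_attributes ctx (prime_objects ctx attributes)

def find_pair_implications (context : List (String × List String)) : List (List String × List String) :=
  let ctx := pvCtx context
  let all_attrs := PySem.List.sorted (pvUnionVals ctx) (fun x => x) false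
  (PySem.List.enumerate all_attrs).foldl (fun results ia =>
    (PySem.List.slice all_attrs (some (ia.1 + 1)) none).foldl (fun results a2 =>
      let pair := PySem.Set.add (PySem.Set.add PySem.Set.empty ia.2) a2
      let c := fcaClosure ctx pair
      if PySem.Set.diff c pair ≠ [] then results ++ [(pair, c)] else results) results) []

-- ===== PORT B =====
-- extent index: for each attribute, the set of objects possessing it
def extentOf (ctx : PySem.Dict String (List String)) : PySem.Dict String (List String) :=
  ctx.items.foldl (fun e p =>
    p.2.foldl (fun e a => PySem.Dict.modify e a PySem.Set.empty (fun s => PySem.Set.add s p.1)) e)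
    PySem.Dict.empty

def pairClosure (ctx : PySem.Dict String (List String)) (extent : PySem.Dict String (List String))
    (a1 a2 : String) : List String :=
  let objs := PySem.Set.inter (extent.getD a1 PySem.Set.empty) (extent.getD a2 PySem.Set.empty)
  if objs ≠ [] then
    match intersectLoop ctx objs with
    | some r => r
    | none => PySem.Set.empty
  else pvUnionVals ctx

def find_pair_implications_alt (context : List (String × List String)) : List (List String × List String) :=
  let ctx := pvCtx context
  let extent := extentOf ctx
  let full := pvUnionVals ctx
  let all_attrs := PySem.List.sorted full (fun x => x) false
  (PySem.List.enumerate all_attrs).foldl (fun results ia =>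
    (PySem.List.slice all_attrs (some (ia.1 + 1)) none).foldl (fun results a2 =>
      let c := pairClosure ctx extent ia.2 a2
      let pair := PySem.Set.add (PySem.Set.add PySem.Set.empty ia.2) a2
      if PySem.Set.diff c pair ≠ [] then results ++ [(pair, c)] else results) results) []

-- ===== PRECONDITION & SPEC =====
def Spec_find_pair_implications (context : List (String × List String)) (out : List (List String × List String)) : Prop := out = find_pair_implications_alt context
instance (context : List (String × List String)) (out : List (List String × List String)) : Decidable (Spec_find_pair_implications context out) := by unfold Spec_find_pair_implications; infer_instance

-- ===== CLAIM (what is proved, stated in full; the proofs are below) =====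
def Claim_equal_find_pair_implications : Prop := ∀ (context : List (String × List String)), Dom_find_pair_implications context → Spec_find_pair_implications context (find_pair_implications context)

-- ===== LEMMAS AND PROOFS =====

theorem pv_add_of_not_contains {s : List String} {x : String}
    (h : PySem.Set.contains s x = false) : PySem.Set.add s x = s ++ [x] := by
  unfold PySem.Set.add; rw [h]; simp

-- the inner 'for a in attrs' loop of the extent build, seen through getD
theorem pv_inner_getD (attrs : List String) (e : PySem.Dict String (List String)) (a obj : String) :
    (attrs.foldl (fun e x => PySem.Dict.modify e x PySem.Set.empty (fun s => PySem.Set.add s obj)) e).getD a PySem.Set.empty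
      = if a ∈ attrs then PySem.Set.add (e.getD a PySem.Set.empty) obj else e.getD a PySem.Set.empty := by
  induction attrs generalizing e with
  | nil => simp
  | cons x rest ih =>
    simp only [List.foldl_cons, ih, PySem.Dict.getD_modify]
    by_cases hax : a = x
    · subst hax
      by_cases hr : a ∈ rest <;> simp [hr]
    · simp [hax]

-- the extent fold appends each new object to the row of every attribute it has
theorem pv_extent_getD (L : List (String × List String)) (e : PySem.Dict String (List String)) (a : String)
    (hfresh : ∀ p ∈ L, p.1 ∉ e.getD a PySem.Set.empty) (hnd : (L.map (·.1)).Nodup) :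
    (L.foldl (fun e p => p.2.foldl (fun e x => PySem.Dict.modify e x PySem.Set.empty (fun s => PySem.Set.add s p.1)) e) e).getD a PySem.Set.empty
      = e.getD a PySem.Set.empty ++ (L.filter (fun p => PySem.Set.contains p.2 a)).map (·.1) := by
  induction L generalizing e with
  | nil => simp
  | cons p rest ih =>
    simp only [List.map_cons, List.nodup_cons] at hnd
    have hp : p.1 ∉ e.getD a PySem.Set.empty := hfresh p (by simp)
    have hone : (p.2.foldl (fun e x => PySem.Dict.modify e x PySem.Set.empty (fun s => PySem.Set.add s p.1)) e).getD a PySem.Set.empty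
        = e.getD a PySem.Set.empty ++ (if PySem.Set.contains p.2 a then [p.1] else []) := by
      rw [pv_inner_getD]
      by_cases hmem : a ∈ p.2
      · have hc : PySem.Set.contains p.2 a = true := by
          simpa [PySem.Set.contains, List.contains_eq_mem] using hmem
        have hpc : PySem.Set.contains (e.getD a PySem.Set.empty) p.1 = false := by
          simpa [PySem.Set.contains, List.contains_eq_mem] using hp
        rw [if_pos hmem, hc]
        simp only [PySem.Set.add, hpc, Bool.false_eq_true, if_false, if_true]
      · have hc : PySem.Set.contains p.2 a = false := by
          simpa [PySem.Set.contains, List.contains_eq_mem] using hmem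
        simp [hmem]
    simp only [List.foldl_cons]
    rw [ih _ ?_ hnd.2, hone]
    · by_cases hm : a ∈ p.2 <;>
        simp [hm, PySem.Set.contains, List.contains_eq_mem, List.append_assoc]
    · intro q hq
      rw [hone]
      simp only [List.mem_append]
      rintro (h1 | h2)
      · exact hfresh q (by simp [hq]) h1
      · have hq1 : q.1 = p.1 := by
          by_cases hm : a ∈ p.2 <;>
            simp [hm, PySem.Set.contains, List.contains_eq_mem] at h2
          exact h2
        exact hnd.1 (hq1 ▸ List.mem_map.2 ⟨q, hq, rfl⟩)

-- key uniqueness: membership of q.1 in a filtered key column decides the predicate at q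
theorem pv_mem_map_fst_filter {L : List (String × List String)} (hnd : (L.map (·.1)).Nodup)
    (Q : String × List String → Bool) {q : String × List String} (hq : q ∈ L) :
    decide (q.1 ∈ (L.filter Q).map (·.1)) = Q q := by
  by_cases h : Q q = true
  · simp [h, List.mem_map.2 ⟨q, List.mem_filter.2 ⟨hq, h⟩, rfl⟩]
  · have hnot : q.1 ∉ (L.filter Q).map (·.1) := by
      intro hmem
      rcases List.mem_map.1 hmem with ⟨r, hr, hr1⟩
      have hrq : r = q := List.inj_on_of_nodup_map hnd (List.mem_of_mem_filter hr) hq hr1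
      exact h (hrq ▸ (List.mem_filter.1 hr).2)
    simp [hnot, h]

-- intersection of two extent rows = one filtered pass over the items (keys distinct)
theorem pv_inter_filter (L : List (String × List String)) (hnd : (L.map (·.1)).Nodup)
    (P Q : String × List String → Bool) :
    PySem.Set.inter ((L.filter P).map (·.1)) ((L.filter Q).map (·.1))
      = (L.filter (fun p => P p && Q p)).map (·.1) := by
  unfold PySem.Set.inter
  rw [List.filter_map, List.filter_filter]
  apply congrArg
  apply List.filter_congr
  intro q hq
  have hmem := pv_mem_map_fst_filter hnd Q hq
  simp only [Function.comp, PySem.Set.contains, List.contains_eq_mem, hmem]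
  exact Bool.and_comm _ _

theorem pv_issubset_pair (a1 a2 : String) (t : List String) :
    PySem.Set.issubset (PySem.Set.add (PySem.Set.add PySem.Set.empty a1) a2) t
      = (PySem.Set.contains t a1 && PySem.Set.contains t a2) := by
  by_cases h : a1 = a2
  · subst h
    simp [PySem.Set.add, PySem.Set.empty, PySem.Set.issubset, PySem.Set.contains,
      List.contains_eq_mem]
  · have h2 : PySem.Set.add (PySem.Set.add PySem.Set.empty a1) a2 = [a1, a2] := by
      have h1 : PySem.Set.add PySem.Set.empty a1 = [a1] := rfl
      have hc : PySem.Set.contains [a1] a2 = false := by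
        simpa [PySem.Set.contains, List.contains_eq_mem] using Ne.symm h
      rw [h1, pv_add_of_not_contains hc]; rfl
    rw [h2]
    simp [PySem.Set.issubset, PySem.Set.contains, List.contains_eq_mem]

theorem pv_pair_ne_nil (a1 a2 : String) :
    PySem.Set.add (PySem.Set.add PySem.Set.empty a1) a2 ≠ [] := by
  by_cases h : a2 = a1 <;>
    simp [PySem.Set.add, PySem.Set.empty, PySem.Set.contains, List.contains_eq_mem, h]

theorem pv_keys_nodup (context : List (String × List String)) : (pvCtx context).keys.Nodup := by
  unfold pvCtx
  exact PySem.Dict.nodup_keys_foldl_insert_key context (·.1) (fun d kv => PySem.Set.ofList kv.2)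
    PySem.Dict.empty PySem.Dict.nodup_keys_empty

-- the per-pair closures of the two ports agree
theorem pv_closure_eq (context : List (String × List String)) (a1 a2 : String) :
    fcaClosure (pvCtx context) (PySem.Set.add (PySem.Set.add PySem.Set.empty a1) a2)
      = pairClosure (pvCtx context) (extentOf (pvCtx context)) a1 a2 := by
  set ctx := pvCtx context with hctx
  have hnd : (ctx.items.map (·.1)).Nodup := pv_keys_nodup context
  have hext : ∀ a, (extentOf ctx).getD a PySem.Set.empty
      = (ctx.items.filter (fun p => PySem.Set.contains p.2 a)).map (·.1) := by
    intro a
    unfold extentOf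
    rw [pv_extent_getD _ _ _ (by simp [PySem.Dict.getD_empty]) hnd]
    simp [PySem.Dict.getD_empty]
  have hobjs : prime_objects ctx (PySem.Set.add (PySem.Set.add PySem.Set.empty a1) a2)
      = PySem.Set.inter ((extentOf ctx).getD a1 PySem.Set.empty) ((extentOf ctx).getD a2 PySem.Set.empty) := by
    rw [hext, hext, pv_inter_filter _ hnd]
    unfold prime_objects
    rw [if_neg (pv_pair_ne_nil a1 a2)]
    have hpred : (fun p : String × List String => PySem.Set.issubset (PySem.Set.add (PySem.Set.add PySem.Set.empty a1) a2) p.2)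
        = (fun p => PySem.Set.contains p.2 a1 && PySem.Set.contains p.2 a2) := by
      funext p; exact pv_issubset_pair a1 a2 p.2
    rw [hpred]
    apply PySem.Set.ofList_eq_self_of_nodup
    exact hnd.sublist (List.Sublist.map _ List.filter_sublist)
  unfold fcaClosure pairClosure prime_attributes
  rw [hobjs]
  simp only [PySem.Set.empty]
  by_cases hobj : PySem.Set.inter ((extentOf ctx).getD a1 ([] : List String)) ((extentOf ctx).getD a2 ([] : List String)) = []
  · simp only [hobj, ne_eq, not_true_eq_false, if_false, if_true]
    by_cases hit : ctx.items = [] <;>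
      simp [hit, pvUnionVals, PySem.Dict.values, PySem.Set.empty]
  · simp [hobj]

-- ===== VERDICT (by name: the statement is the Claim_ definition above) =====
theorem find_pair_implications_spec : Claim_equal_find_pair_implications := by
  intro context _
  unfold Spec_find_pair_implications find_pair_implications find_pair_implications_alt
  dsimp only
  congr 1
  funext results ia
  congr 1
  funext results a2
  rw [pv_closure_eq context ia.2 a2]
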